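-- pv_equiv track=rewrite | github.com/jetsaints30/axie-api | app/models/cards.py | is_filter_and_card_equal
-- ===== SOURCE A (Python) =====
-- from typing import List, Tuple
--
-- def is_filter_and_card_equal(
--                              filter_parts: Tuple,
--                              card_parts: Tuple
--                             ) -> bool:
--
--     is_included : bool = False
--
--     for filter_part, card_part in zip(filter_parts, card_parts):
--         if filter_part is None:
--             continue
--
--         is_included = filter_part == card_part
--
--     return is_included
-- ===== SOURCE B (Python) =====
-- def is_filter_and_card_equal(filter_parts, card_parts):
--     for filter_part, card_part in reversed(list(zip(filter_parts, card_parts))):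
--         if filter_part is not None:
--             return filter_part == card_part
--     return False
-- ===== Notes on version B (the rewrite author's own statement) =====
-- stated objective: simpler
-- what changed: Replaces the forward full scan that keeps overwriting a flag with a reverse scan over the zipped pairs that returns at the first non-None filter part (False if none exists).
import Mathlib
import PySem

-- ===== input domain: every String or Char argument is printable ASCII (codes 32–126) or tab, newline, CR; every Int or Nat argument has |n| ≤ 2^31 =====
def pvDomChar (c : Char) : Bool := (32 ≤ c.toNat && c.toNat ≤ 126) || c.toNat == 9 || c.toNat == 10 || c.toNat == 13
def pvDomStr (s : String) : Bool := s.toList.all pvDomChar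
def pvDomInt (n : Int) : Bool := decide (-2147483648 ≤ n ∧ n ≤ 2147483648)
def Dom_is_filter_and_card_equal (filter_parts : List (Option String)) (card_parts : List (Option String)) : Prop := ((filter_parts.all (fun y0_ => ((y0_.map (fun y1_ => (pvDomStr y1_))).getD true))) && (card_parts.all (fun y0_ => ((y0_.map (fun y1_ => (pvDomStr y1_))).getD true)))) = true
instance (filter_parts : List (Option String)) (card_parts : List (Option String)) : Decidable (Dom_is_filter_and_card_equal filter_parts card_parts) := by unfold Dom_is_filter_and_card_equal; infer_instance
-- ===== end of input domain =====

-- B replaces A's forward overwrite-a-flag scan by a reverse scan with early exit; objective: simpler.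


-- ===== PORT A =====
-- forward loop over the zipped pairs, overwriting is_included whenever filter_part is not None
def is_filter_and_card_equal (filter_parts : List (Option String)) (card_parts : List (Option String)) : Bool :=
  (filter_parts.zip card_parts).foldl
    (fun is_included fc =>
      if fc.1 = none then is_included
      else fc.1 == fc.2)
    false

-- ===== PORT B =====
-- reverse scan: return at the first pair whose filter part is not None; False if none
def pvRevScan : List (Option String × Option String) → Bool
  | [] => false
  | (f, c) :: rest => if f = none then pvRevScan rest else f == c

def is_filter_and_card_equal_alt (filter_parts : List (Option String)) (card_parts : List (Option String)) : Bool :=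
  pvRevScan (filter_parts.zip card_parts).reverse

-- ===== PRECONDITION & SPEC =====
def Spec_is_filter_and_card_equal (filter_parts : List (Option String)) (card_parts : List (Option String)) (out : Bool) : Prop := out = is_filter_and_card_equal_alt filter_parts card_parts
instance (filter_parts : List (Option String)) (card_parts : List (Option String)) (out : Bool) : Decidable (Spec_is_filter_and_card_equal filter_parts card_parts out) := by unfold Spec_is_filter_and_card_equal; infer_instance

-- ===== CLAIM (what is proved, stated in full; the proofs are below) =====
def Claim_equal_is_filter_and_card_equal : Prop := ∀ (filter_parts : List (Option String)) (card_parts : List (Option String)), Dom_is_filter_and_card_equal filter_parts card_parts → Spec_is_filter_and_card_equal filter_parts card_parts (is_filter_and_card_equal filter_parts card_parts)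

-- ===== LEMMAS AND PROOFS =====
-- proof-only generalisation of pvRevScan with an accumulator for the empty case
def pvRevScanAcc (acc : Bool) : List (Option String × Option String) → Bool
  | [] => acc
  | (f, c) :: rest => if f = none then pvRevScanAcc acc rest else f == c

theorem pvRevScanAcc_false (L : List (Option String × Option String)) :
    pvRevScanAcc false L = pvRevScan L := by
  induction L with
  | nil => rfl
  | cons hd tl ih =>
    obtain ⟨f, c⟩ := hd
    simp only [pvRevScanAcc, pvRevScan, ih]

theorem pvRevScanAcc_append (acc : Bool) (xs : List (Option String × Option String))
    (f c : Option String) :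
    pvRevScanAcc acc (xs ++ [(f, c)]) = pvRevScanAcc (if f = none then acc else f == c) xs := by
  induction xs with
  | nil => rfl
  | cons hd tl ih =>
    obtain ⟨f', c'⟩ := hd
    simp only [List.cons_append, pvRevScanAcc, ih]

theorem foldl_eq_revScanAcc (L : List (Option String × Option String)) (acc : Bool) :
    L.foldl (fun is_included fc => if fc.1 = none then is_included else fc.1 == fc.2) acc
      = pvRevScanAcc acc L.reverse := by
  induction L generalizing acc with
  | nil => rfl
  | cons hd tl ih =>
    obtain ⟨f, c⟩ := hd
    simp only [List.foldl_cons, List.reverse_cons, ih, pvRevScanAcc_append]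

-- ===== VERDICT (by name: the statement is the Claim_ definition above) =====
theorem is_filter_and_card_equal_spec : Claim_equal_is_filter_and_card_equal := by
  intro fp cp _
  unfold Spec_is_filter_and_card_equal is_filter_and_card_equal is_filter_and_card_equal_alt
  rw [foldl_eq_revScanAcc, pvRevScanAcc_false]
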